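-- pv_equiv track=rewrite | github.com/Jairo2544/Calculadora_estadistica | Python/estadistica.py | quantity
-- ===== SOURCE A (Python) =====
-- def ordenar(array):
-- 	array.sort()
-- 	return array
--
-- def quantity(array):
-- 	ordenar(array)
-- 	cantidad = []
-- 	i = 0
-- 	while(i < len(array)):
-- 		quantity = 0
-- 		a = 0
-- 		while(a < len(array)):
-- 			if array[i] == array[a]:
-- 				quantity = quantity + 1
-- 			a = a + 1
-- 		cantidad.append(quantity)
-- 		i = i + 1
-- 	return cantidad
-- ===== SOURCE B (Python) =====
-- def quantity(array):
--     array.sort()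
--     res = []
--     i = 0
--     n = len(array)
--     while i < n:
--         j = i
--         while j < n and array[j] == array[i]:
--             j += 1
--         L = j - i
--         res += [L] * L
--         i = j
--     return res
-- ===== Notes on version B (the rewrite author's own statement) =====
-- stated objective: faster
-- what changed: Replaces the quadratic per-index recount (inner scan of the whole array for every position) by a single forward pass over the sorted array that detects each run of equal values once and emits its length L exactly L times.
import Mathlib
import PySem

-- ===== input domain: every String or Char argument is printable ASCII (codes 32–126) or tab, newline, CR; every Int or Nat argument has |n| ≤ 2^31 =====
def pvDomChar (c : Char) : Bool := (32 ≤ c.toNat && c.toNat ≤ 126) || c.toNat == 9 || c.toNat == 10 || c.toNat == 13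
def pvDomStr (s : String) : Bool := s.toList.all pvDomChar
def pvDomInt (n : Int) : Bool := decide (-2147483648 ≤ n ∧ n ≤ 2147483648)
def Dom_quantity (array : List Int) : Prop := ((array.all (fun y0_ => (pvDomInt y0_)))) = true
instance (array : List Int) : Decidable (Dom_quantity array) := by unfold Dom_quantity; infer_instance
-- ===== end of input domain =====

-- B replaces A's quadratic per-index recount by one run-length pass over the sorted
-- array (the sort dominates). Both Pythons sort the argument in place (same mutation);
-- the equivalence proved here is about the return value.

-- ===== PORT A =====
-- A sorts, then for each index i scans the whole array counting elements equal to array[i].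
def quantity (array : List Int) : List Int :=
  let s := PySem.List.sorted array (fun x => x) false
  (List.range s.length).foldl
    (fun cantidad i =>
      let q := (List.range s.length).foldl
        (fun q a => if s.getD i 0 == s.getD a 0 then q + 1 else q) (0 : Int)
      cantidad ++ [q]) []

-- ===== PORT B =====
-- outer while: recursion on the remaining suffix; inner while (advance j over the run): takeWhile/dropWhile
def quantityRuns : List Int → List Int
  | [] => []
  | x :: xs =>
    let t := xs.takeWhile (fun y => y == x)
    let L : Int := (t.length : Int) + 1
    List.replicate (t.length + 1) L ++ quantityRuns (xs.dropWhile (fun y => y == x))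
termination_by l => l.length
decreasing_by
  simp only [List.length_cons]
  exact Nat.lt_succ_of_le (List.length_dropWhile_le _ _)

def quantity_alt (array : List Int) : List Int :=
  quantityRuns (PySem.List.sorted array (fun x => x) false)

-- ===== PRECONDITION & SPEC =====
def Spec_quantity (array : List Int) (out : List Int) : Prop := out = quantity_alt array
instance (array : List Int) (out : List Int) : Decidable (Spec_quantity array out) := by unfold Spec_quantity; infer_instance

-- ===== CLAIM (what is proved, stated in full; the proofs are below) =====
def Claim_equal_quantity : Prop := ∀ (array : List Int), Dom_quantity array → Spec_quantity array (quantity array)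

-- ===== LEMMAS AND PROOFS =====

-- the inner counting loop of A computes the number of occurrences of x in s
theorem foldl_if_count (l : List Int) (x : Int) (init : Int) :
    l.foldl (fun q a => if x == a then q + 1 else q) init = init + (l.count x : Int) := by
  induction l generalizing init with
  | nil => simp
  | cons y ys ih =>
    simp only [List.foldl_cons, List.count_cons, ih]
    by_cases h : x = y
    · simp [h]; ring
    · have h' : ¬ (y = x) := fun hc => h hc.symm
      simp [h, h', beq_iff_eq]

-- indexing map = map
theorem map_getD (s : List Int) (g : Int → Int) :
    (List.range s.length).map (fun i => g (s.getD i 0)) = s.map g := by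
  induction s with
  | nil => simp
  | cons x xs ih =>
    simp only [List.length_cons, List.range_succ_eq_map, List.map_cons, List.map_map]
    refine congrArg₂ _ rfl ?_
    simpa [Function.comp] using ih

theorem inner_count (s : List Int) (x : Int) :
    (List.range s.length).foldl (fun q a => if x == s.getD a 0 then q + 1 else q) (0 : Int)
      = (s.count x : Int) := by
  have h1 : (List.range s.length).foldl (fun q a => if x == s.getD a 0 then q + 1 else q) (0 : Int)
      = ((List.range s.length).map (fun a => s.getD a 0)).foldl
          (fun q a => if x == a then q + 1 else q) (0 : Int) := by
    rw [List.foldl_map]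
  rw [h1, map_getD s (fun z => z), List.map_id', foldl_if_count]
  simp

-- the outer appending loop of A is a map over the indices
theorem outer_map (n : Nat) (f : Nat → Int) (init : List Int) :
    (List.range n).foldl (fun acc i => acc ++ [f i]) init = init ++ (List.range n).map f := by
  induction n generalizing init with
  | zero => simp
  | succ m ih => simp [List.range_succ, ih]

-- every element of a dropWhile suffix of a sorted list differs from the dropped value
theorem dropWhile_ne (x : Int) (xs : List Int) (hp : (x :: xs).Pairwise (· ≤ ·))
    (z : Int) (hz : z ∈ xs.dropWhile (fun y => y == x)) : z ≠ x := by
  induction xs with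
  | nil => simp at hz
  | cons y ys ih =>
    rcases List.pairwise_cons.mp hp with ⟨hx, hyys⟩
    rcases List.pairwise_cons.mp hyys with ⟨hy, hys⟩
    by_cases hxy : y = x
    · have : (y :: ys).dropWhile (fun y => y == x) = ys.dropWhile (fun y => y == x) := by
        simp [hxy]
      rw [this] at hz
      exact ih (List.pairwise_cons.mpr ⟨fun a ha => hx a (List.mem_cons_of_mem _ ha), hys⟩) hz
    · have : (y :: ys).dropWhile (fun y => y == x) = y :: ys := by
        simp [hxy]
      rw [this] at hz
      rcases List.mem_cons.mp hz with h | h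
      · exact h ▸ hxy
      · have hxylt : x < y := lt_of_le_of_ne (hx y (List.mem_cons_self)) (Ne.symm hxy)
        have : y ≤ z := hy z h
        omega

-- run-length characterisation of the count-map on a sorted list
theorem runs_eq_map_count (s : List Int) (hs : s.Pairwise (· ≤ ·)) :
    s.map (fun z => (s.count z : Int)) = quantityRuns s := by
  match s with
  | [] => simp [quantityRuns]
  | x :: xs =>
    set t := xs.takeWhile (fun y => y == x) with ht
    set d := xs.dropWhile (fun y => y == x) with hd
    have htd : t ++ d = xs := List.takeWhile_append_dropWhile
    have ht_eq : ∀ y ∈ t, y = x := fun y hy => by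
      simpa using List.mem_takeWhile_imp hy
    have hd_ne : ∀ z ∈ d, z ≠ x := fun z hz => dropWhile_ne x xs hs z hz
    have hcount_t : t.count x = t.length :=
      List.count_eq_length.mpr (fun b hb => (ht_eq b hb).symm)
    have hcount_d : d.count x = 0 :=
      List.count_eq_zero.mpr (fun hc => hd_ne x hc rfl)
    have hcx : (x :: xs).count x = t.length + 1 := by
      rw [← htd]
      simp [List.count_append, hcount_t, hcount_d]
    have hdp : d.Pairwise (· ≤ ·) := by
      have hsub : d.Sublist (x :: xs) :=
        (List.dropWhile_sublist _).trans (List.sublist_cons_self x xs)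
      exact List.Pairwise.sublist hsub hs
    have hcount_z : ∀ z ∈ d, (x :: xs).count z = d.count z := fun z hz => by
      have hzx : z ≠ x := hd_ne z hz
      have hzt : z ∉ t := fun hc => hzx (ht_eq z hc)
      rw [← htd]
      simp [List.count_append, List.count_eq_zero.mpr hzt,
        (by simpa using Ne.symm hzx : ¬ x = z)]
    have ih : d.map (fun z => (d.count z : Int)) = quantityRuns d :=
      runs_eq_map_count d hdp
    have hmap_xt : (x :: t).map (fun z => ((x :: xs).count z : Int))
        = List.replicate (t.length + 1) ((t.length : Int) + 1) := by
      rw [List.eq_replicate_iff]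
      constructor
      · simp
      · intro b hb
        simp only [List.mem_map] at hb
        rcases hb with ⟨y, hy, hby⟩
        have hyx : y = x := by
          rcases List.mem_cons.mp hy with h | h
          · exact h
          · exact ht_eq y h
        rw [← hby, hyx, hcx]
        push_cast; ring
    have hmap_d : d.map (fun z => ((x :: xs).count z : Int)) = quantityRuns d := by
      rw [List.map_congr_left (fun z hz => by rw [hcount_z z hz]), ih]
    have hsplit : ∀ (f : Int → Int), (x :: xs).map f = (x :: t).map f ++ d.map f := by
      intro f
      conv_lhs => rw [show x :: xs = (x :: t) ++ d from by rw [List.cons_append, htd]]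
      rw [List.map_append]
    calc (x :: xs).map (fun z => ((x :: xs).count z : Int))
        = (x :: t).map (fun z => ((x :: xs).count z : Int))
          ++ d.map (fun z => ((x :: xs).count z : Int)) := hsplit _
      _ = List.replicate (t.length + 1) ((t.length : Int) + 1) ++ quantityRuns d := by
          rw [hmap_xt, hmap_d]
      _ = quantityRuns (x :: xs) := by
          rw [quantityRuns]
termination_by s.length
decreasing_by
  have := List.length_dropWhile_le (fun y => y == x) xs
  simp only [List.length_cons]
  omega

-- ===== VERDICT (by name: the statement is the Claim_ definition above) =====
theorem quantity_spec : Claim_equal_quantity := by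
  intro array _
  unfold Spec_quantity quantity quantity_alt
  set s := PySem.List.sorted array (fun x => x) false with hs
  have hp : s.Pairwise (· ≤ ·) := PySem.List.sorted_pairwise array (fun x => x)
  simp only [inner_count, outer_map, List.nil_append]
  rw [map_getD s (fun z => (s.count z : Int))]
  exact runs_eq_map_count s hp
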